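-- pv_equiv track=rewrite | github.com/saltykittycat-tech/website-builder | src/blocktype.py | check_list_numbers_are_in_order
-- ===== SOURCE A (Python) =====
-- def check_list_numbers_are_in_order(numbers):
--     prev_number = 0
--     for number in numbers:
--         num = number
--         expected = str(prev_number + 1)
--         if num == expected:
--             prev_number = int(expected)
--         elif num != expected:
--             return False
--     return True
-- ===== SOURCE B (Python) =====
-- def check_list_numbers_are_in_order(numbers):
--     nums = list(numbers)
--
--     def ok(lo, hi):
--         # nums[lo:hi] is exactly [str(lo+1), ..., str(hi)]
--         if hi - lo <= 1:
--             return hi == lo or nums[lo] == str(lo + 1)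
--         mid = (lo + hi) // 2
--         return ok(lo, mid) and ok(mid, hi)
--
--     return ok(0, len(nums))
-- ===== Notes on version B (the rewrite author's own statement) =====
-- stated objective: alternative
-- what changed: Replaces A's left-to-right scan with a running prev_number accumulator and early return by a divide-and-conquer recursion on index ranges: ok(lo,hi) checks that nums[lo:hi] is exactly str(lo+1)..str(hi) by splitting at the midpoint, with single-element base cases and no accumulator.
import Mathlib
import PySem

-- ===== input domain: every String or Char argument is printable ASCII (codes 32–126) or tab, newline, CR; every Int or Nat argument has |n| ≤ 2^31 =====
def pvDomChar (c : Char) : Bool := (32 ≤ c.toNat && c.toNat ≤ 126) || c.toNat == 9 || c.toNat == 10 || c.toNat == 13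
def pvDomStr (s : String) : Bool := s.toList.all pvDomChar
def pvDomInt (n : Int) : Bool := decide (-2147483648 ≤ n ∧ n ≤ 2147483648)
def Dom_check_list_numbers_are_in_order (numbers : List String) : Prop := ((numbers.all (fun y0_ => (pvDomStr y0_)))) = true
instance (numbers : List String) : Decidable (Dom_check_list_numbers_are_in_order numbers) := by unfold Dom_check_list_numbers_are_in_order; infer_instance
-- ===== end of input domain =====

-- B replaces A's left-to-right scan with a running prev_number accumulator by a
-- divide-and-conquer recursion on index ranges (objective: alternative, same cost).

-- ===== PORT A =====
-- for number in numbers: … with state prev_number; early `return False` = the `false` branch.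
-- `prev_number = int(expected)` where expected = str(prev_number + 1): int ∘ str is the
-- identity on ints, so the assigned value is exactly prev_number + 1 (exact, same value).
def pvALoop (prev_number : Int) : List String → Bool
  | [] => true
  | number :: rest =>
      let num := number
      let expected := PySem.Int.toStr (prev_number + 1)
      if num = expected then pvALoop (prev_number + 1) rest
      else if num ≠ expected then false
      else pvALoop prev_number rest

def check_list_numbers_are_in_order (numbers : List String) : Bool :=
  pvALoop 0 numbers

-- ===== PORT B =====
-- ok(lo, hi): nums[lo:hi] is exactly [str(lo+1), …, str(hi)].  lo, hi stay ≥ 0 throughout,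
-- so Nat carries them and Nat `/ 2` = Python `(lo + hi) // 2` exactly; `nums[lo]` is
-- PySem.List.pyGet? (the index is always in range on B's calls, so `== some …` is exact).
def pvBOk (nums : List String) (lo hi : Nat) : Bool :=
  if hi - lo ≤ 1 then
    (hi == lo) || (PySem.List.pyGet? nums (lo : Int) == some (PySem.Int.toStr ((lo : Int) + 1)))
  else
    let mid := (lo + hi) / 2
    pvBOk nums lo mid && pvBOk nums mid hi
termination_by hi - lo
decreasing_by
  · omega
  · omega

def check_list_numbers_are_in_order_alt (numbers : List String) : Bool :=
  pvBOk numbers 0 numbers.length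

-- ===== PRECONDITION & SPEC =====
def Spec_check_list_numbers_are_in_order (numbers : List String) (out : Bool) : Prop := out = check_list_numbers_are_in_order_alt numbers
instance (numbers : List String) (out : Bool) : Decidable (Spec_check_list_numbers_are_in_order numbers out) := by unfold Spec_check_list_numbers_are_in_order; infer_instance

-- ===== CLAIM (what is proved, stated in full; the proofs are below) =====
def Claim_equal_check_list_numbers_are_in_order : Prop := ∀ (numbers : List String), Dom_check_list_numbers_are_in_order numbers → Spec_check_list_numbers_are_in_order numbers (check_list_numbers_are_in_order numbers)

-- ===== LEMMAS AND PROOFS =====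

-- A's loop, started at prev, asks exactly whether the remaining list is
-- [str(prev+1), …, str(prev+length)].
theorem pvALoop_eq_decide (l : List String) : ∀ prev : Int,
    pvALoop prev l
      = decide (l = (PySem.List.pyRange (prev + 1) (prev + 1 + l.length) 1).map PySem.Int.toStr) := by
  induction l with
  | nil =>
      intro prev
      rw [PySem.List.pyRange_one_eq_nil (by simp)]
      simp [pvALoop]
  | cons n rest ih =>
      intro prev
      have hb : prev + 1 + ((n :: rest).length : Int) = prev + 1 + 1 + (rest.length : Int) := by
        simp only [List.length_cons]; push_cast; ring
      have hc := PySem.List.pyRange_one_cons (a := prev + 1)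
        (b := prev + 1 + ((n :: rest).length : Int))
        (by rw [hb]; have := Int.natCast_nonneg rest.length; omega)
      rw [hb] at hc
      rw [hb, hc]
      by_cases h : n = PySem.Int.toStr (prev + 1)
      · simp [pvALoop, h, ih (prev + 1)]
      · simp [pvALoop, h]

-- B's recursion on a segment asks exactly the pointwise condition on that segment.
theorem pvBOk_iff (nums : List String) : ∀ d lo hi, hi - lo = d → lo ≤ hi → hi ≤ nums.length →
    (pvBOk nums lo hi = true ↔
      ∀ i, lo ≤ i → i < hi → nums[i]? = some (PySem.Int.toStr ((i : Int) + 1))) := by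
  intro d
  induction d using Nat.strong_induction_on with
  | _ d ih =>
    intro lo hi hd hle hlen
    by_cases hsmall : hi - lo ≤ 1
    · rw [pvBOk, if_pos hsmall]
      rcases Nat.lt_or_ge lo hi with hlt | hge
      · -- hi = lo + 1
        have hhi : hi = lo + 1 := by omega
        have hidx : PySem.List.pyGet? nums (lo : Int) = nums[lo]? := by
          rw [PySem.List.pyGet?_natCast]
        constructor
        · intro h i h1 h2
          have hi' : i = lo := by omega
          subst hi'
          simp only [Bool.or_eq_true, beq_iff_eq] at h
          rcases h with h | h
          · omega
          · rw [← hidx]; exact h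
        · intro h
          have := h lo le_rfl (by omega)
          simp only [Bool.or_eq_true, beq_iff_eq]
          right; rw [hidx]; exact this
      · -- hi = lo (empty segment)
        have hhi : hi = lo := by omega
        subst hhi
        simp only [beq_self_eq_true, Bool.true_or, true_iff]
        intro i h1 h2; omega
    · rw [pvBOk, if_neg hsmall]
      have hmid1 : lo ≤ (lo + hi) / 2 := by omega
      have hmid2 : (lo + hi) / 2 ≤ hi := by omega
      have h1 := ih ((lo + hi) / 2 - lo) (by omega) lo ((lo + hi) / 2) rfl hmid1 (by omega)
      have h2 := ih (hi - (lo + hi) / 2) (by omega) ((lo + hi) / 2) hi rfl hmid2 hlen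
      simp only [Bool.and_eq_true, h1, h2]
      constructor
      · rintro ⟨ha, hb⟩ i hi1 hi2
        rcases Nat.lt_or_ge i ((lo + hi) / 2) with h | h
        · exact ha i hi1 h
        · exact hb i h hi2
      · intro h
        exact ⟨fun i a b => h i a (by omega), fun i a b => h i (by omega) b⟩

-- A's whole-list equation is the same pointwise condition over [0, length).
theorem list_eq_iff_pointwise (nums : List String) :
    (nums = (PySem.List.pyRange 1 ((nums.length : Int) + 1) 1).map PySem.Int.toStr) ↔
      ∀ i, 0 ≤ i → i < nums.length → nums[i]? = some (PySem.Int.toStr ((i : Int) + 1)) := by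
  have hlen : ((PySem.List.pyRange 1 ((nums.length : Int) + 1) 1).map PySem.Int.toStr).length
      = nums.length := by
    simp [PySem.List.length_pyRange_one]
  constructor
  · intro h i _ hi
    conv_lhs => rw [h]
    rw [List.getElem?_map]
    have : (PySem.List.pyRange 1 ((nums.length : Int) + 1) 1)[i]? = some (1 + (i : Int)) := by
      rw [List.getElem?_eq_getElem (by simp [PySem.List.length_pyRange_one]; omega),
        PySem.List.getElem_pyRange_one]
    rw [this]
    simp [add_comm]
  · intro h
    apply List.ext_getElem?
    intro i
    rcases Nat.lt_or_ge i nums.length with hi | hi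
    · rw [h i (Nat.zero_le i) hi, List.getElem?_map,
        List.getElem?_eq_getElem (by simp [PySem.List.length_pyRange_one]; omega),
        PySem.List.getElem_pyRange_one]
      simp [add_comm]
    · rw [List.getElem?_eq_none hi, List.getElem?_eq_none (by omega)]

-- ===== VERDICT (by name: the statement is the Claim_ definition above) =====
theorem check_list_numbers_are_in_order_spec : Claim_equal_check_list_numbers_are_in_order := by
  intro numbers _
  unfold Spec_check_list_numbers_are_in_order
  unfold check_list_numbers_are_in_order check_list_numbers_are_in_order_alt
  rw [pvALoop_eq_decide]
  have hB := pvBOk_iff numbers (numbers.length - 0) 0 numbers.length rfl (Nat.zero_le _) le_rfl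
  refine Bool.eq_iff_iff.mpr ?_
  rw [decide_eq_true_iff, hB,
    show (0 : Int) + 1 = 1 from by ring,
    show (1 : Int) + (numbers.length : Int) = (numbers.length : Int) + 1 from by ring,
    list_eq_iff_pointwise]
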